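-- pv_equiv track=rewrite | github.com/jano31415/codejam | kickstart/k2020_g/a.py | solve
-- ===== SOURCE A (Python) =====
-- def solve(book):
--     tot = 0
--     nrkick =0
--     for i,s in enumerate(book):
--         if i > len(book) - 5:
--             break
--         if book[i:i+4] == "KICK":
--             nrkick += 1
--         if book[i:i+5] == "START":
--             tot+=nrkick
--     return tot
-- ===== SOURCE B (Python) =====
-- import bisect
--
-- def solve(book):
--     n = len(book)
--     kicks = [i for i in range(n) if book[i:i + 4] == "KICK"]
--     starts = [s for s in range(n) if book[s:s + 5] == "START"]
--     return sum(bisect.bisect_left(kicks, s) for s in starts)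
-- ===== Notes on version B (the rewrite author's own statement) =====
-- stated objective: alternative
-- what changed: Replaces the single forward pass with a running KICK counter by prebuilding the lists of KICK and START positions with two comprehensions and summing, for each START position, the number of KICK positions strictly before it via bisect.bisect_left.
import Mathlib
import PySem

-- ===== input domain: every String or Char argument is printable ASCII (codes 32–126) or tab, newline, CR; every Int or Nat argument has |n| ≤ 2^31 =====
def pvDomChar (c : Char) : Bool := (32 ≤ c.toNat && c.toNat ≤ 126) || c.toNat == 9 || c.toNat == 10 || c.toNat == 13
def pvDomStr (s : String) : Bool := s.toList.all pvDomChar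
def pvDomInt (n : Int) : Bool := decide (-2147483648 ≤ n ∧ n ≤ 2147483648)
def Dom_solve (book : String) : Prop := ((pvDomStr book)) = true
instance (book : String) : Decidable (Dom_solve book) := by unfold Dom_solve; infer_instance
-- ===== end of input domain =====

-- B replaces A's single forward pass with a running KICK counter by a prebuilt list of
-- KICK positions queried with bisect_left at each START position (alternative decomposition).

-- ===== PORT A =====
-- the loop 'for i,s in enumerate(book): if i > len(book)-5: break; …' as structural recursion
-- over the enumerated character list, carrying (tot, nrkick)
def solveGo (book : String) (n : Int) : List (Int × Char) → Int → Int → Int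
  | [], tot, _ => tot
  | (i, _) :: rest, tot, nrkick =>
    if i > n - 5 then tot
    else
      let nrkick' := if PySem.Str.slice book (some i) (some (i + 4)) == "KICK" then nrkick + 1 else nrkick
      let tot' := if PySem.Str.slice book (some i) (some (i + 5)) == "START" then tot + nrkick' else tot
      solveGo book n rest tot' nrkick'

def solve (book : String) : Int :=
  solveGo book (PySem.Str.len book) (PySem.List.enumerate book.toList) 0 0

-- ===== PORT B =====
def solve_alt (book : String) : Int :=
  let n := PySem.Str.len book
  let kicks := (PySem.List.pyRange 0 n 1).filter
    (fun i => PySem.Str.slice book (some i) (some (i + 4)) == "KICK")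
  let starts := (PySem.List.pyRange 0 n 1).filter
    (fun s => PySem.Str.slice book (some s) (some (s + 5)) == "START")
  starts.foldl (fun acc s => acc + (PySem.List.bisectLeft kicks s : Int)) 0

-- ===== PRECONDITION & SPEC =====
def Spec_solve (book : String) (out : Int) : Prop := out = solve_alt book
instance (book : String) (out : Int) : Decidable (Spec_solve book out) := by unfold Spec_solve; infer_instance

-- ===== CLAIM (what is proved, stated in full; the proofs are below) =====
def Claim_equal_solve : Prop := ∀ (book : String), Dom_solve book → Spec_solve book (solve book)

-- ===== LEMMAS AND PROOFS =====

-- 'book[j:j+4] == "KICK"' / 'book[j:j+5] == "START"' at a Nat position, on the list side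
def kb (L : List Char) (j : Nat) : Bool := decide ((L.drop j).take 4 = ['K', 'I', 'C', 'K'])
def sb (L : List Char) (j : Nat) : Bool := decide ((L.drop j).take 5 = ['S', 'T', 'A', 'R', 'T'])

-- number of KICK positions strictly below s
def kcount (L : List Char) (s : Nat) : Nat := (List.range s).countP (kb L)

-- Σ_{j ≤ s < j+len, START at s} kcount s : the common value of both programs
def pairSum (L : List Char) (j len : Nat) : Int :=
  (((List.range' j len).filter (sb L)).map (fun s => (kcount L s : Int))).sum

lemma kick_test_eq (book : String) (j : Nat) :
    (PySem.Str.slice book (some (j : Int)) (some ((j : Int) + 4)) == "KICK") = kb book.toList j := by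
  have h4 : ((j : Int) + 4) = ((j : Int) + ((4 : Nat) : Int)) := by norm_num
  apply Bool.eq_iff_iff.mpr
  rw [beq_iff_eq, kb, decide_eq_true_iff]
  constructor
  · intro h
    have := congrArg String.toList h
    rw [PySem.Str.toList_slice] at this
    simpa [PySem.Chars.slice, h4, PySem.List.slice_natCast_add] using this
  · intro h
    apply String.toList_inj.mp
    rw [PySem.Str.toList_slice]
    simpa [PySem.Chars.slice, h4, PySem.List.slice_natCast_add] using h

lemma start_test_eq (book : String) (j : Nat) :
    (PySem.Str.slice book (some (j : Int)) (some ((j : Int) + 5)) == "START") = sb book.toList j := by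
  have h5 : ((j : Int) + 5) = ((j : Int) + ((5 : Nat) : Int)) := by norm_num
  apply Bool.eq_iff_iff.mpr
  rw [beq_iff_eq, sb, decide_eq_true_iff]
  constructor
  · intro h
    have := congrArg String.toList h
    rw [PySem.Str.toList_slice] at this
    simpa [PySem.Chars.slice, h5, PySem.List.slice_natCast_add] using this
  · intro h
    apply String.toList_inj.mp
    rw [PySem.Str.toList_slice]
    simpa [PySem.Chars.slice, h5, PySem.List.slice_natCast_add] using h

-- no START fits when fewer than 5 characters remain
lemma sb_false_of_short (L : List Char) (j : Nat) (h : L.length < j + 5) : sb L j = false := by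
  rw [sb, decide_eq_false_iff_not]
  intro h'
  have := congrArg List.length h'
  simp at this
  omega

-- a position cannot carry both KICK and START ('K' ≠ 'S' at the first character)
lemma kb_false_of_sb (L : List Char) (j : Nat) (h : sb L j = true) : kb L j = false := by
  rw [sb, decide_eq_true_iff] at h
  rw [kb, decide_eq_false_iff_not]
  cases hd : L.drop j with
  | nil => rw [hd] at h; simp at h
  | cons c t =>
    rw [hd] at h
    simp at h
    rw [h.1]
    simp

lemma kcount_succ (L : List Char) (j : Nat) :
    kcount L (j + 1) = kcount L j + (if kb L j then 1 else 0) := by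
  rw [kcount, kcount, List.range_succ, List.countP_append]
  simp [List.countP_cons]

-- the loop invariant: with nrkick = #KICKs below j, the loop over positions j… adds pairSum from j
lemma solveGo_eq (book : String) :
    ∀ (cs : List Char) (j : Nat) (tot nrkick : Int),
      book.toList.drop j = cs →
      nrkick = (kcount book.toList j : Int) →
      solveGo book (book.toList.length : Int) (PySem.List.enumerate cs (j : Int)) tot nrkick
        = tot + pairSum book.toList j (book.toList.length - j) := by
  intro cs
  induction cs with
  | nil =>
    intro j tot nrkick hdrop _
    have hj : book.toList.length ≤ j := List.drop_eq_nil_iff.mp hdrop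
    have : book.toList.length - j = 0 := by omega
    rw [this]
    simp [PySem.List.enumerate_nil, solveGo, pairSum]
  | cons c cs ih =>
    intro j tot nrkick hdrop hnr
    have hjlt : j < book.toList.length := by
      by_contra hc
      rw [List.drop_eq_nil_of_le (by omega)] at hdrop
      exact List.cons_ne_nil c cs hdrop.symm
    have hdrop' : book.toList.drop (j + 1) = cs := by
      have := congrArg List.tail hdrop
      simpa [List.tail_drop] using this
    rw [PySem.List.enumerate_cons, solveGo]
    by_cases hbr : (j : Int) > (book.toList.length : Int) - 5
    · rw [if_pos hbr]
      have hz : pairSum book.toList j (book.toList.length - j) = 0 := by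
        rw [pairSum]
        have : (List.range' j (book.toList.length - j)).filter (sb book.toList) = [] := by
          rw [List.filter_eq_nil_iff]
          intro s hs
          rw [List.mem_range'_1] at hs
          rw [sb_false_of_short book.toList s (by omega)]
          simp
        rw [this]; simp
      rw [hz]; ring
    · rw [if_neg hbr]
      have hkc : kcount book.toList (j + 1) =
          kcount book.toList j + (if kb book.toList j then 1 else 0) := kcount_succ _ _
      rw [kick_test_eq, start_test_eq]
      have hlen : book.toList.length - j = (book.toList.length - (j + 1)) + 1 := by omega
      have hrange : List.range' j (book.toList.length - j)
          = j :: List.range' (j + 1) (book.toList.length - (j + 1)) := by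
        rw [hlen, List.range'_succ]
      have ihs := ih (j + 1) (if sb book.toList j then
              tot + (if kb book.toList j then nrkick + 1 else nrkick) else tot)
          (if kb book.toList j then nrkick + 1 else nrkick) hdrop'
          (by rw [hkc, hnr]; by_cases hk : kb book.toList j <;> simp [hk])
      push_cast at ihs
      rw [ihs]
      simp only [pairSum, hrange, List.filter_cons]
      by_cases hsb : sb book.toList j = true
      · rw [kb_false_of_sb book.toList j hsb]
        simp only [hsb, if_true, if_false, Bool.false_eq_true, List.map_cons, List.sum_cons]
        rw [hnr]
        ring
      · simp [hsb]

-- counting characterisation of bisect_left on a sorted list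
lemma bisect_eq_countP (xs : List Int) (hs : xs.Pairwise (· ≤ ·)) (x : Int) :
    PySem.List.bisectLeft xs x = xs.countP (fun v => decide (v < x)) := by
  obtain ⟨hble, hlt, hge⟩ := PySem.List.bisectLeft_spec xs x hs
  conv_rhs => rw [← List.take_append_drop (PySem.List.bisectLeft xs x) xs]
  rw [List.countP_append]
  have h1 : (xs.take (PySem.List.bisectLeft xs x)).countP (fun v => decide (v < x))
      = (xs.take (PySem.List.bisectLeft xs x)).length := by
    rw [List.countP_eq_length]
    intro a ha
    rw [List.mem_take_iff_getElem] at ha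
    obtain ⟨k, hk, hka⟩ := ha
    rw [decide_eq_true_iff, ← hka]
    exact hlt k (by omega) (by omega)
  have h2 : (xs.drop (PySem.List.bisectLeft xs x)).countP (fun v => decide (v < x)) = 0 := by
    rw [List.countP_eq_zero]
    intro a ha
    rw [List.mem_iff_getElem] at ha
    obtain ⟨k, hk, hka⟩ := ha
    rw [List.getElem_drop] at hka
    rw [decide_eq_true_iff, ← hka]
    have := hge (PySem.List.bisectLeft xs x + k) (by simp at hk; omega) (by omega)
    omega
  rw [h1, h2, List.length_take]
  omega

-- the kicks-below-s count, read off B's index list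
lemma countP_kicks (L : List Char) (s n : Nat) (hsn : s ≤ n) :
    ((List.range n).filter (kb L)).countP (fun j => decide (j < s)) = kcount L s := by
  rw [List.countP_filter, kcount]
  have hsplit : List.range n = List.range' 0 s ++ List.range' s (n - s) := by
    have happ := @List.range'_append 0 s (n - s) 1
    simp at happ
    have h' : s + (n - s) = n := by omega
    rw [h'] at happ
    rw [List.range_eq_range', ← happ]
  rw [hsplit, List.countP_append, List.range_eq_range']
  have h2 : (List.range' s (n - s)).countP (fun a => decide (a < s) && kb L a) = 0 := by
    rw [List.countP_eq_zero]
    intro a ha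
    rw [List.mem_range'_1] at ha
    simp [Nat.not_lt.mpr ha.1]
  rw [h2, Nat.add_zero]
  apply List.countP_congr
  intro a ha
  rw [List.mem_range'_1] at ha
  have : a < s := by omega
  simp [this]

lemma range'_zero_eq_range (n : Nat) : List.range' 0 n = List.range n := List.range_eq_range'.symm

lemma solve_alt_eq (book : String) :
    solve_alt book = pairSum book.toList 0 book.toList.length := by
  rw [solve_alt, pairSum, range'_zero_eq_range]
  simp only [PySem.Str.len_eq, PySem.List.pyRange_zero_nat, List.filter_map]
  have hk : ((fun i => PySem.Str.slice book (some i) (some (i + 4)) == "KICK") ∘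
      (fun k : Nat => (k : Int))) = kb book.toList := by
    funext j; exact kick_test_eq book j
  have hst : ((fun s => PySem.Str.slice book (some s) (some (s + 5)) == "START") ∘
      (fun k : Nat => (k : Int))) = sb book.toList := by
    funext j; exact start_test_eq book j
  rw [hk, hst, PySem.List.foldl_add, List.map_map, zero_add]
  apply congrArg List.sum
  apply List.map_congr_left
  intro s hs
  rw [List.mem_filter] at hs
  have hsn : s < book.toList.length := List.mem_range.mp hs.1
  simp only [Function.comp]
  congr 1
  -- bisectLeft on the (sorted) cast kick list equals kcount s
  have hpw : (((List.range book.toList.length).filter (kb book.toList)).map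
      (fun k : Nat => (k : Int))).Pairwise (· ≤ ·) := by
    apply List.Pairwise.map (fun k : Nat => (k : Int))
      (fun a b h => by show (a : Int) ≤ (b : Int); exact_mod_cast Nat.le_of_lt h)
    exact List.Pairwise.filter _ List.pairwise_lt_range
  rw [bisect_eq_countP _ hpw, List.countP_map]
  have : ((fun v : Int => decide (v < (s : Int))) ∘ (fun k : Nat => (k : Int)))
      = fun j : Nat => decide (j < s) := by
    funext j; simp
  rw [this, countP_kicks book.toList s book.toList.length (by omega)]

-- ===== VERDICT (by name: the statement is the Claim_ definition above) =====
theorem solve_spec : Claim_equal_solve := by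
  intro book _
  unfold Spec_solve
  rw [solve_alt_eq, solve, PySem.Str.len_eq]
  have h := solveGo_eq book book.toList 0 0 0 (by simp) (by simp [kcount])
  simp only [Nat.cast_zero, Nat.sub_zero] at h
  rw [h]
  ring
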